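-- pv_equiv track=rewrite | github.com/Santiago1119/Python-coursera | catalogo.py | producto_mas_barato
-- ===== SOURCE A (Python) =====
-- def producto_mas_barato(catalogo:dict)->str:
--     """
--     Retorna el producto más barato exceptuando algunas condiciones
--
--     Parameters
--     ----------
--     catalogo : dict
--         diccionario que contiene los productos, las llaves poseen el nombre
--         del producto y el valor posee el precio.
--
--     Returns
--     -------
--     str
--         String con el nombre del producto más economico del diccionario.
--
--     """
--
--     producto_barato = None
--     llaves = catalogo.keys()
--     llaves_ordenadas = sorted(llaves)
--     diccionario_ordenado = {}
--
--     for llave in llaves_ordenadas: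
--         diccionario_ordenado[llave] = catalogo[llave]
--
--     if len(catalogo) > 0:
--         producto_barato = min(diccionario_ordenado, key=diccionario_ordenado.get)
--
--     if len(catalogo) == 0:
--         producto_barato = "No hay productos para escoger"
--
--     if len(catalogo) > 0:
--         if diccionario_ordenado[producto_barato] > 10000:
--             producto_barato = None
--
--
--     return producto_barato
-- ===== SOURCE B (Python) =====
-- def producto_mas_barato(catalogo: dict) -> str:
--     """Single linear pass: track the minimum price, breaking ties by the
--     smaller (lexicographically) product name; no sorting, no second dict."""
--     if len(catalogo) == 0:
--         return "No hay productos para escoger"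
--     mejor_nombre = None
--     mejor_precio = None
--     for nombre, precio in catalogo.items():
--         if (mejor_precio is None or precio < mejor_precio
--                 or (precio == mejor_precio and nombre < mejor_nombre)):
--             mejor_nombre, mejor_precio = nombre, precio
--     if mejor_precio > 10000:
--         return None
--     return mejor_nombre
-- ===== Notes on version B (the rewrite author's own statement) =====
-- stated objective: faster
-- what changed: Replaced sort-keys + rebuild-ordered-dict + min(dict, key=get) with one linear fold that tracks the minimum price and breaks price ties by the smaller name; Pre_ excludes association lists with duplicate keys, which represent no Python dict (A's parameter is a dict, so such inputs cannot occur) and on which the two list encodings' first-match vs last-match readings are both accidental.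
import Mathlib
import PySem

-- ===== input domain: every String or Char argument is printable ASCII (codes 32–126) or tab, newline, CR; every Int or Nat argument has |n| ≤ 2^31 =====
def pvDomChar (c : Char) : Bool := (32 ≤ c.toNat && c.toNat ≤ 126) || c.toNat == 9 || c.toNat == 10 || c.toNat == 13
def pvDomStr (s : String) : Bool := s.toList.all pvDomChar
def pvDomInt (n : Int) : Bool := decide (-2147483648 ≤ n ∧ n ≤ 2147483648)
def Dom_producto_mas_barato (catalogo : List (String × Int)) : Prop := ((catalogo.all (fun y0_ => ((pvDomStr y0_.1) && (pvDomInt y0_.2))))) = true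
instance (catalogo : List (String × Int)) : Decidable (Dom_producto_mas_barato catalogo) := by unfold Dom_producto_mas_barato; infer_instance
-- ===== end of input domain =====

-- B replaces A's sort-keys + rebuild-dict + min(dict, key=get) with one linear pass
-- tracking the minimum price (ties go to the smaller name); equivalence is about the
-- return value (A mutates nothing).

-- ===== PORT A =====
-- Literal port of A: sort the key list, rebuild the dict in key order, take
-- min(dict, key=dict.get), then drop the answer if its price exceeds 10000.
-- Every key looked up (catalogo[llave], dicc.get) comes from the dict's own key
-- list, so the lookups never miss and getD's default 0 is unreachable.
def producto_mas_barato (catalogo : List (String × Int)) : Option String :=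
  let cat : PySem.Dict String Int := PySem.Dict.mk catalogo
  let llaves := cat.keys
  let llaves_ordenadas := PySem.List.sorted llaves (fun x => x) false
  let diccionario_ordenado :=
    llaves_ordenadas.foldl (fun d llave => d.insert llave (cat.getD llave 0)) PySem.Dict.empty
  let producto_barato : Option String :=
    if catalogo.length > 0 then
      PySem.List.min? diccionario_ordenado.keys (fun k => diccionario_ordenado.getD k 0)
    else none
  let producto_barato :=
    if catalogo.length = 0 then some "No hay productos para escoger" else producto_barato
  if catalogo.length > 0 then
    match producto_barato with
    | some p => if diccionario_ordenado.getD p 0 > 10000 then none else some p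
    | none => none
  else producto_barato

-- ===== PORT B =====
-- 'precio < mejor_precio or (precio == mejor_precio and nombre < mejor_nombre)'
def pvLexLt (e b : String × Int) : Bool := e.2 < b.2 || (e.2 == b.2 && e.1 < b.1)

def producto_mas_barato_alt (catalogo : List (String × Int)) : Option String :=
  if catalogo.length = 0 then some "No hay productos para escoger"
  else
    match catalogo.foldl (fun best e =>
            match best with
            | none => some e
            | some b => if pvLexLt e b then some e else some b) none with
    | some m => if m.2 > 10000 then none else some m.1
    | none => none

-- ===== PRECONDITION & SPEC =====
-- A's parameter is a Python dict, whose keys are necessarily distinct; an association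
-- list with a repeated key represents no dict, so those lists are excluded.
def Pre_producto_mas_barato (catalogo : List (String × Int)) : Prop :=
  (catalogo.map Prod.fst).Nodup
instance (catalogo : List (String × Int)) : Decidable (Pre_producto_mas_barato catalogo) := by
  unfold Pre_producto_mas_barato; infer_instance

def pvWitness_producto_mas_barato : (List (String × Int)) := [("pan", 5), ("leche", 3)]

def Spec_producto_mas_barato (catalogo : List (String × Int)) (out : Option String) : Prop := out = producto_mas_barato_alt catalogo
instance (catalogo : List (String × Int)) (out : Option String) : Decidable (Spec_producto_mas_barato catalogo out) := by unfold Spec_producto_mas_barato; infer_instance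

-- ===== CLAIM (what is proved, stated in full; the proofs are below) =====
def Claim_equal_producto_mas_barato : Prop := ∀ (catalogo : List (String × Int)), Dom_producto_mas_barato catalogo → Pre_producto_mas_barato catalogo → Spec_producto_mas_barato catalogo (producto_mas_barato catalogo)

-- ===== LEMMAS AND PROOFS =====

theorem pvLexLt_irrefl (e : String × Int) : pvLexLt e e = false := by simp [pvLexLt]

theorem pvLexLt_trans {a b c : String × Int} (h1 : pvLexLt a b = true)
    (h2 : pvLexLt b c = true) : pvLexLt a c = true := by
  simp only [pvLexLt, Bool.or_eq_true, Bool.and_eq_true, decide_eq_true_eq, beq_iff_eq] at *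
  rcases h1 with h1 | ⟨h1, h1'⟩ <;> rcases h2 with h2 | ⟨h2, h2'⟩
  · exact Or.inl (lt_trans h1 h2)
  · exact Or.inl (h2 ▸ h1)
  · exact Or.inl (h1 ▸ h2)
  · exact Or.inr ⟨h1.trans h2, lt_trans h1' h2'⟩

theorem pvLexLt_asymm {a b : String × Int} (h : pvLexLt a b = true) : pvLexLt b a = false := by
  by_contra hc
  have hb : pvLexLt b a = true := by revert hc; cases pvLexLt b a <;> simp
  have := pvLexLt_trans h hb
  rw [pvLexLt_irrefl] at this
  exact Bool.false_ne_true this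

theorem bfold_some (t : List (String × Int)) :
    ∀ (b : String × Int), ∃ m,
      t.foldl (fun best e =>
          match best with
          | none => some e
          | some b => if pvLexLt e b then some e else some b) (some b) = some m := by
  induction t with
  | nil => intro b; exact ⟨b, rfl⟩
  | cons e t ih =>
    intro b
    simp only [List.foldl_cons]
    by_cases h : pvLexLt e b = true
    · rw [if_pos h]; exact ih e
    · rw [if_neg h]; exact ih b

theorem bfold_spec (t : List (String × Int)) :
    ∀ (b m : String × Int),
      t.foldl (fun best e =>
          match best with
          | none => some e
          | some b => if pvLexLt e b then some e else some b) (some b) = some m →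
      (m = b ∨ m ∈ t) ∧ (m = b ∨ pvLexLt m b = true) ∧ ∀ e ∈ t, pvLexLt e m = false := by
  induction t with
  | nil =>
    intro b m h
    simp only [List.foldl_nil, Option.some.injEq] at h
    refine ⟨Or.inl h.symm, Or.inl h.symm, by simp⟩
  | cons e t ih =>
    intro b m h
    simp only [List.foldl_cons] at h
    by_cases hlt : pvLexLt e b = true
    · rw [if_pos hlt] at h
      obtain ⟨hm1, hm2, hm3⟩ := ih e m h
      have hmb : m = b ∨ pvLexLt m b = true := by
        rcases hm2 with rfl | h2
        · exact Or.inr hlt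
        · exact Or.inr (pvLexLt_trans h2 hlt)
      have hem : pvLexLt e m = false := by
        rcases hm2 with rfl | h2
        · exact pvLexLt_irrefl m
        · exact pvLexLt_asymm h2
      refine ⟨?_, hmb, ?_⟩
      · rcases hm1 with rfl | h1
        · exact Or.inr List.mem_cons_self
        · exact Or.inr (List.mem_cons_of_mem _ h1)
      · intro f hf
        rcases List.mem_cons.mp hf with rfl | hf'
        · exact hem
        · exact hm3 f hf'
    · have hltf : pvLexLt e b = false := by revert hlt; cases pvLexLt e b <;> simp
      rw [if_neg hlt] at h
      obtain ⟨hm1, hm2, hm3⟩ := ih b m h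
      have hem : pvLexLt e m = false := by
        rcases hm2 with rfl | h2
        · exact hltf
        · by_contra hc
          have hc' : pvLexLt e m = true := by revert hc; cases pvLexLt e m <;> simp
          have := pvLexLt_trans hc' h2
          rw [hltf] at this
          exact Bool.false_ne_true this
      refine ⟨?_, hm2, ?_⟩
      · rcases hm1 with rfl | h1
        · exact Or.inl rfl
        · exact Or.inr (List.mem_cons_of_mem _ h1)
      · intro f hf
        rcases List.mem_cons.mp hf with rfl | hf'
        · exact hem
        · exact hm3 f hf'

theorem min?_cons2 (v : String → Int) (x j : String) (t : List String) :
    PySem.List.min? (x :: j :: t) v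
      = PySem.List.min? ((if v j < v x then j else x) :: t) v := by
  by_cases h : v j < v x <;> simp [PySem.List.min?, h]

theorem min?_sorted_spec (v : String → Int) :
    ∀ (t : List String) (x k : String), (x :: t).Pairwise (· < ·) →
      PySem.List.min? (x :: t) v = some k →
      k ∈ x :: t ∧ ∀ j ∈ x :: t, v k < v j ∨ (v k = v j ∧ k ≤ j) := by
  intro t
  induction t with
  | nil =>
    intro x k _ h
    simp only [PySem.List.min?, List.foldl_cons, List.foldl_nil, Option.some.injEq] at h
    subst h
    refine ⟨List.mem_singleton.mpr rfl, ?_⟩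
    intro j hj
    rw [List.mem_singleton.mp hj]
    exact Or.inr ⟨rfl, le_refl _⟩
  | cons j t ih =>
    intro x k hpw h
    rw [min?_cons2] at h
    have hxj : x < j := (List.pairwise_cons.mp hpw).1 j List.mem_cons_self
    have hpw' : (j :: t).Pairwise (· < ·) := (List.pairwise_cons.mp hpw).2
    by_cases hv : v j < v x
    · rw [if_pos hv] at h
      obtain ⟨hk1, hk2⟩ := ih j k hpw' h
      refine ⟨?_, ?_⟩
      · rcases List.mem_cons.mp hk1 with rfl | h1
        · exact List.mem_cons_of_mem _ List.mem_cons_self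
        · exact List.mem_cons_of_mem _ (List.mem_cons_of_mem _ h1)
      · intro l hl
        rcases List.mem_cons.mp hl with rfl | hl'
        · have hkj := hk2 j List.mem_cons_self
          rcases hkj with hlt2 | ⟨heq, _⟩
          · exact Or.inl (lt_trans hlt2 hv)
          · exact Or.inl (heq ▸ hv)
        · exact hk2 l hl'
    · rw [if_neg hv] at h
      have hpwx : (x :: t).Pairwise (· < ·) := by
        rw [List.pairwise_cons] at hpw ⊢
        exact ⟨fun y hy => hpw.1 y (List.mem_cons_of_mem _ hy),
               (List.pairwise_cons.mp hpw.2).2⟩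
      obtain ⟨hk1, hk2⟩ := ih x k hpwx h
      refine ⟨?_, ?_⟩
      · rcases List.mem_cons.mp hk1 with rfl | h1
        · exact List.mem_cons_self
        · exact List.mem_cons_of_mem _ (List.mem_cons_of_mem _ h1)
      · intro l hl
        rcases List.mem_cons.mp hl with rfl | hl'
        · exact hk2 l List.mem_cons_self
        · rcases List.mem_cons.mp hl' with rfl | hl''
          · have hkx := hk2 x List.mem_cons_self
            have hxle : v x ≤ v l := le_of_not_gt hv
            rcases hkx with hlt2 | ⟨heq, hle⟩
            · exact Or.inl (lt_of_lt_of_le hlt2 hxle)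
            · rcases lt_or_eq_of_le hxle with hlt2 | heq2
              · exact Or.inl (heq ▸ hlt2)
              · exact Or.inr ⟨heq.trans heq2, le_of_lt (lt_of_le_of_lt hle hxj)⟩
          · exact hk2 l (List.mem_cons_of_mem _ hl'')

theorem build_items (f : String → Int) :
    ∀ (ks : List String) (init : List (String × Int)), ks.Nodup →
      (∀ k ∈ ks, k ∉ init.map Prod.fst) →
      (ks.foldl (fun d llave => d.insert llave (f llave)) (PySem.Dict.mk init)).items
        = init ++ ks.map (fun k => (k, f k)) := by
  intro ks
  induction ks with
  | nil => intro init _ _; simp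
  | cons k t ih =>
    intro init hnd hfresh
    simp only [List.foldl_cons]
    have hkf : k ∉ init.map Prod.fst := hfresh k List.mem_cons_self
    have hcon : (PySem.Dict.mk init).contains k = false := by
      simp only [PySem.Dict.contains]
      rw [List.any_eq_false]
      intro p hp
      rw [beq_iff_eq]
      intro hEq
      exact hkf (List.mem_map.mpr ⟨p, hp, hEq⟩)
    have hins : (PySem.Dict.mk init).insert k (f k) = PySem.Dict.mk (init ++ [(k, f k)]) := by
      simp [PySem.Dict.insert, hcon]
    rw [hins]
    have hnd' := (List.nodup_cons.mp hnd)
    have := ih (init ++ [(k, f k)]) hnd'.2 ?_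
    · rw [this]; simp
    · intro k' hk'
      simp only [List.map_append, List.mem_append, List.map_cons, List.map_nil]
      rintro (h | h)
      · exact hfresh k' (List.mem_cons_of_mem _ hk') h
      · simp at h
        exact hnd'.1 (h ▸ hk')

theorem get?_mapped (f : String → Int) :
    ∀ (L : List String) (k : String), k ∈ L →
      (PySem.Dict.mk (L.map (fun k => (k, f k)))).get? k = some (f k) := by
  intro L
  induction L with
  | nil => intro k h; simp at h
  | cons x t ih =>
    intro k h
    by_cases hx : x = k
    · subst hx; simp [PySem.Dict.get?]
    · rcases List.mem_cons.mp h with rfl | hmem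
      · exact absurd rfl hx
      · have := ih k hmem
        simp only [PySem.Dict.get?, List.map_cons, List.find?] at this ⊢
        rw [show ((x, f x).1 == k) = false from beq_eq_false_iff_ne.mpr hx]
        exact this

theorem get?_mem {xs : List (String × Int)} {k : String} {v : Int}
    (h : (PySem.Dict.mk xs).get? k = some v) : (k, v) ∈ xs := by
  simp only [PySem.Dict.get?, Option.map_eq_some_iff] at h
  obtain ⟨p, hp, hv⟩ := h
  have hmem := List.mem_of_find?_eq_some hp
  have hk := List.find?_some hp
  simp only [beq_iff_eq] at hk
  have : (k, v) = p := by rw [← hk, ← hv]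
  rw [this]; exact hmem

theorem mem_get? {xs : List (String × Int)} {e : String × Int}
    (hnd : (xs.map Prod.fst).Nodup) (h : e ∈ xs) :
    (PySem.Dict.mk xs).get? e.1 = some e.2 := by
  induction xs with
  | nil => simp at h
  | cons x t ih =>
    simp only [List.map_cons, List.nodup_cons] at hnd
    rcases List.mem_cons.mp h with rfl | hmem
    · simp [PySem.Dict.get?]
    · have hne : x.1 ≠ e.1 := fun hEq => hnd.1 (hEq ▸ List.mem_map.mpr ⟨e, hmem, rfl⟩)
      have := ih hnd.2 hmem
      simp only [PySem.Dict.get?, List.find?] at this ⊢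
      rw [show (x.1 == e.1) = false from beq_eq_false_iff_ne.mpr hne]
      exact this

theorem get?_isSome {xs : List (String × Int)} {k : String}
    (h : k ∈ xs.map Prod.fst) : ∃ v, (PySem.Dict.mk xs).get? k = some v := by
  simp only [PySem.Dict.get?]
  obtain ⟨p, hp, hk⟩ := List.mem_map.mp h
  have : (List.find? (fun p => p.1 == k) xs).isSome := by
    apply List.find?_isSome.mpr
    exact ⟨p, hp, by simp [hk]⟩
  obtain ⟨q, hq⟩ := Option.isSome_iff_exists.mp this
  exact ⟨q.2, by rw [hq]; rfl⟩

-- ===== VERDICT (by name: the statement is the Claim_ definition above) =====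
theorem producto_mas_barato_spec : Claim_equal_producto_mas_barato := by
  intro catalogo _ hnd
  unfold Spec_producto_mas_barato
  cases catalogo with
  | nil => decide
  | cons c rest =>
    set catalogo := c :: rest with hcat
    have hlen : catalogo.length > 0 := by simp [hcat]
    have hlen0 : ¬ catalogo.length = 0 := by simp [hcat]
    -- abbreviations
    set cat : PySem.Dict String Int := PySem.Dict.mk catalogo with hcatd
    set N : List String := catalogo.map Prod.fst with hN
    set L : List String := PySem.List.sorted N (fun x => x) false with hL
    set v : String → Int := fun k => cat.getD k 0 with hv
    have hkeys0 : cat.keys = N := rfl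
    have hperm : L.Perm N := PySem.List.sorted_perm N (fun x => x) false
    have hLnd : L.Nodup := hperm.nodup_iff.mpr hnd
    have hplt : L.Pairwise (· < ·) := by
      have h1 : L.Pairwise (· ≤ ·) := PySem.List.sorted_pairwise N (fun x => x)
      have h2 : L.Pairwise (· ≠ ·) := hLnd
      exact (h1.and h2).imp (fun h => lt_of_le_of_ne h.1 h.2)
    -- the rebuilt dict
    set dicc : PySem.Dict String Int :=
      L.foldl (fun d llave => d.insert llave (cat.getD llave 0)) PySem.Dict.empty with hdicc
    have hitems : dicc.items = L.map (fun k => (k, v k)) := by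
      rw [hdicc]
      exact build_items v L [] hLnd (by simp)
    have hdkeys : dicc.keys = L := by
      simp [PySem.Dict.keys, hitems, Function.comp_def]
    have hgetD : ∀ k ∈ L, dicc.getD k 0 = v k := by
      intro k hk
      have : dicc = PySem.Dict.mk (L.map (fun k => (k, v k))) := PySem.Dict.ext hitems
      rw [this, PySem.Dict.getD, get?_mapped v L k hk]
      rfl
    -- characterize A's result
    have hA : producto_mas_barato catalogo
        = (match PySem.List.min? dicc.keys (fun k => dicc.getD k 0) with
           | some p => if dicc.getD p 0 > 10000 then none else some p
           | none => none) := by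
      simp only [producto_mas_barato]
      rw [if_neg hlen0, if_pos hlen, if_pos hlen]
      rfl
    -- characterize B's result
    have hB : producto_mas_barato_alt catalogo
        = (match catalogo.foldl (fun best e =>
                match best with
                | none => some e
                | some b => if pvLexLt e b then some e else some b) none with
           | some m => if m.2 > 10000 then none else some m.1
           | none => none) := by
      simp only [producto_mas_barato_alt]
      rw [if_neg hlen0]
    -- B's fold returns some minimal element
    obtain ⟨mB, hmB⟩ := bfold_some rest c
    have hBfold : catalogo.foldl (fun best e =>
        match best with
        | none => some e
        | some b => if pvLexLt e b then some e else some b) none = some mB := by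
      rw [hcat]; simpa only [List.foldl_cons] using hmB
    obtain ⟨hmB1, hmB2, hmB3⟩ := bfold_spec rest c mB hmB
    have hmBmem : mB ∈ catalogo := by
      rcases hmB1 with rfl | h1
      · exact List.mem_cons_self
      · exact List.mem_cons_of_mem _ h1
    have hBmin : ∀ e ∈ catalogo, pvLexLt e mB = false := by
      intro e he
      rcases List.mem_cons.mp he with rfl | h
      · rcases hmB2 with rfl | h2
        · exact pvLexLt_irrefl _
        · exact pvLexLt_asymm h2
      · exact hmB3 e h
    have hget_mB : cat.get? mB.1 = some mB.2 := mem_get? hnd hmBmem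
    have hvmB : v mB.1 = mB.2 := by simp [hv, PySem.Dict.getD, hget_mB]
    have hmBL : mB.1 ∈ L := hperm.mem_iff.mpr (List.mem_map.mpr ⟨mB, hmBmem, rfl⟩)
    -- A's min? returns some
    cases hkA : PySem.List.min? dicc.keys (fun k => dicc.getD k 0) with
    | none =>
      exfalso
      rw [hdkeys] at hkA
      have hLnil : L = [] := (PySem.List.min?_eq_none_iff L _).mp hkA
      have : N = [] := (hLnil ▸ hperm).symm.eq_nil ▸ rfl
      simp [hN, hcat] at this
    | some kA =>
      cases hLs : L with
      | nil =>
        exfalso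
        have : N = [] := (hLs ▸ hperm).symm.eq_nil ▸ rfl
        simp [hN, hcat] at this
      | cons x t =>
        have hkA' : PySem.List.min? (x :: t) (fun k => dicc.getD k 0) = some kA := by
          rw [← hLs, ← hdkeys]; exact hkA
        obtain ⟨hkmem, hkmin⟩ :=
          min?_sorted_spec (fun k => dicc.getD k 0) t x kA (hLs ▸ hplt) hkA'
        have hkAL : kA ∈ L := hLs ▸ hkmem
        have hkAN : kA ∈ N := hperm.mem_iff.mp hkAL
        obtain ⟨wv, hw⟩ := get?_isSome (xs := catalogo) hkAN
        have heA : (kA, wv) ∈ catalogo := get?_mem hw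
        have hw' : cat.get? kA = some wv := hw
        have hvkA : v kA = wv := by simp [hv, PySem.Dict.getD, hw']
        have e1 : dicc.getD kA 0 = v kA := hgetD kA hkAL
        have e2 : dicc.getD mB.1 0 = v mB.1 := hgetD mB.1 hmBL
        have hAmin := hkmin mB.1 (hLs ▸ hmBL)
        rw [e1, e2, hvkA, hvmB] at hAmin
        have hBkA := hBmin (kA, wv) heA
        simp only [pvLexLt, Bool.or_eq_false_iff, Bool.and_eq_false_iff,
          decide_eq_false_iff_not, beq_eq_false_iff_ne, ne_eq] at hBkA
        have hw_eq : wv = mB.2 := by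
          rcases hAmin with hlt | ⟨heq, _⟩
          · exact absurd hlt hBkA.1
          · exact heq
        have hk_eq : kA = mB.1 := by
          rcases hAmin with hlt | ⟨_, hle⟩
          · exact absurd hlt hBkA.1
          · rcases hBkA.2 with hne | hnlt
            · exact absurd hw_eq hne
            · exact le_antisymm hle (le_of_not_gt hnlt)
        rw [hA, hB, hkA, hBfold]
        show (if dicc.getD kA 0 > 10000 then (none : Option String) else some kA)
            = if mB.2 > 10000 then none else some mB.1
        rw [e1, hvkA, hw_eq, hk_eq]
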